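-- pv_equiv track=rewrite | github.com/fastnlp/fastNLP | reproduction/joint_cws_parse/data/data_loader.py | add_trigram
-- ===== SOURCE A (Python) =====
-- def add_trigram(instance):
--     chars = instance['chars']
--     length = len(chars)
--     chars = chars + ['<eos>'] * 2
--     trigrams = []
--     for i in range(length):
--         trigrams.append(''.join(chars[i:i + 3]))
--     return trigrams
-- ===== SOURCE B (Python) =====
-- def add_trigram(instance):
--     out = []
--     b, c = '<eos>', '<eos>'
--     for a in reversed(instance['chars']):
--         out.append(a + b + c)
--         b, c = a, b
--     out.reverse()
--     return out
-- ===== Notes on version B (the rewrite author's own statement) =====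
-- stated objective: alternative
-- what changed: Instead of padding the list with two sentinels and joining slice windows by index, B makes a single backward pass that carries the next two elements as lookahead state, concatenates each trigram directly, and reverses the accumulated output.
import Mathlib
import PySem

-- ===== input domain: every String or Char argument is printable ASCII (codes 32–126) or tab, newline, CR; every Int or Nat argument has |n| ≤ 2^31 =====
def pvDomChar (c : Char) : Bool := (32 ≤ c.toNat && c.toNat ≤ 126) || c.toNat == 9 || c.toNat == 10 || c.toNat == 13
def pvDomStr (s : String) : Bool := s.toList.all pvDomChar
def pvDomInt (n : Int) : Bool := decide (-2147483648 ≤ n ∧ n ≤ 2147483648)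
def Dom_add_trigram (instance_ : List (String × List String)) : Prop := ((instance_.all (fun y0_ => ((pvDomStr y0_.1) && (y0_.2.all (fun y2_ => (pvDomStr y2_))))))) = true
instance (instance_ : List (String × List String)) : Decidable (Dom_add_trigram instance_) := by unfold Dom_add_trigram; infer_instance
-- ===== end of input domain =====

-- B drops the padded list and the slicing entirely: a single backward pass that carries the
-- next two elements as state and builds the result in reverse; objective: alternative, same cost.

-- ===== PORT A =====
-- instance['chars'] : first matching key in the association list (Pre_ guarantees it exists)
def add_trigram (instance_ : List (String × List String)) : List String :=
  let chars := ((instance_.find? (fun kv => kv.1 == "chars")).map (·.2)).getD []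
  let length : Int := chars.length
  let chars2 := chars ++ ["<eos>", "<eos>"]
  (PySem.List.pyRange 0 length 1).foldl
    (fun trigrams i => trigrams ++ [PySem.Str.join "" (PySem.List.slice chars2 (some i) (some (i + 3)))]) []

-- ===== PORT B =====
-- loop body of Source B: append a+b+c, then shift the lookahead pair to (a, b)
def trigStep (st : List String × String × String) (a : String) : List String × String × String :=
  (st.1 ++ [a ++ st.2.1 ++ st.2.2], a, st.2.1)

def add_trigram_alt (instance_ : List (String × List String)) : List String :=
  let chars := ((instance_.find? (fun kv => kv.1 == "chars")).map (·.2)).getD []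
  ((chars.reverse).foldl trigStep ([], "<eos>", "<eos>")).1.reverse

-- ===== PRECONDITION & SPEC =====
-- Pre_ excludes only the inputs on which A raises KeyError: dicts without the key 'chars'.
def Pre_add_trigram (instance_ : List (String × List String)) : Prop :=
  "chars" ∈ instance_.map Prod.fst
instance (instance_ : List (String × List String)) : Decidable (Pre_add_trigram instance_) := by
  unfold Pre_add_trigram; infer_instance

def pvWitness_add_trigram : (List (String × List String)) := [("chars", ["a", "b", "c"])]

def Spec_add_trigram (instance_ : List (String × List String)) (out : List String) : Prop := out = add_trigram_alt instance_
instance (instance_ : List (String × List String)) (out : List String) : Decidable (Spec_add_trigram instance_ out) := by unfold Spec_add_trigram; infer_instance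

-- ===== CLAIM (what is proved, stated in full; the proofs are below) =====
def Claim_equal_add_trigram : Prop := ∀ (instance_ : List (String × List String)), Dom_add_trigram instance_ → Pre_add_trigram instance_ → Spec_add_trigram instance_ (add_trigram instance_)

-- ===== LEMMAS AND PROOFS =====

-- the common reference: the trigram list as structural recursion with the two pads b, c
def trigP : List String → String → String → List String
  | [], _, _ => []
  | [a], b, c => [a ++ b ++ c]
  | a :: y :: t, b, c => (a ++ y ++ t.headD b) :: trigP (y :: t) b c

theorem join3 (x y z : String) : PySem.Str.join "" [x, y, z] = x ++ y ++ z := by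
  simp [PySem.Str.join, PySem.Chars.join, List.intercalate]
  exact String.append_assoc.symm

-- A's map of joined 3-windows over indices equals trigP
theorem mapwin_eq_trigP : ∀ (xs : List String) (b c : String),
    (List.range xs.length).map
        (fun k => PySem.Str.join "" (((xs ++ [b, c]).drop k).take 3)) = trigP xs b c
  | [], _, _ => by simp [trigP]
  | [a], b, c => by simp [trigP, join3]
  | a :: y :: t, b, c => by
    have ih := mapwin_eq_trigP (y :: t) b c
    rw [List.length_cons, List.range_succ_eq_map, List.map_cons, List.map_map]
    refine congrArg₂ (· :: ·) ?_ ?_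
    · cases t <;> simp [join3]
    · rw [← ih]
      apply List.map_congr_left
      intro k _
      simp [Function.comp]

-- accumulator of the B fold factors out
theorem trigStep_acc : ∀ (rs out : List String) (b c : String),
    (rs.foldl trigStep (out, b, c)).1 = out ++ (rs.foldl trigStep ([], b, c)).1
  | [], out, b, c => by simp
  | a :: rs, out, b, c => by
    rw [List.foldl_cons, List.foldl_cons]
    show (rs.foldl trigStep (out ++ [a ++ b ++ c], a, b)).1 = out ++ (rs.foldl trigStep ([] ++ [a ++ b ++ c], a, b)).1
    rw [trigStep_acc rs (out ++ [a ++ b ++ c]) a b, trigStep_acc rs ([] ++ [a ++ b ++ c]) a b]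
    simp

-- appending one element on the right shifts the pads
theorem trigP_snoc : ∀ (ys : List String) (a b c : String),
    trigP (ys ++ [a]) b c = trigP ys a b ++ [a ++ b ++ c]
  | [], a, b, c => by simp [trigP]
  | [x], a, b, c => by simp [trigP]
  | x :: y :: t, a, b, c => by
    have ih := trigP_snoc (y :: t) a b c
    have hh : (t ++ [a]).headD b = t.headD a := by cases t <;> simp
    show (x ++ y ++ (t ++ [a]).headD b) :: trigP (y :: (t ++ [a])) b c =
      (x ++ y ++ t.headD a) :: (trigP (y :: t) a b ++ [a ++ b ++ c])
    rw [hh, ← ih]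
    rfl

-- B's reverse fold equals trigP
theorem foldB_eq_trigP : ∀ (xs : List String) (b c : String),
    ((xs.reverse.foldl trigStep ([], b, c)).1).reverse = trigP xs b c := by
  intro xs
  induction xs using List.reverseRecOn with
  | nil => intro b c; simp [trigP]
  | append_singleton ys a ih =>
    intro b c
    rw [List.reverse_append, List.reverse_singleton, List.singleton_append, List.foldl_cons]
    show ((ys.reverse.foldl trigStep ([] ++ [a ++ b ++ c], a, b)).1).reverse = _
    rw [trigStep_acc, List.nil_append, List.reverse_append, List.reverse_singleton,
        trigP_snoc, ih]

theorem add_trigram_spec : Claim_equal_add_trigram := by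
  intro instance_ _ _
  unfold Spec_add_trigram add_trigram add_trigram_alt
  set chars := ((instance_.find? (fun kv => kv.1 == "chars")).map (·.2)).getD [] with hchars
  simp only []
  rw [foldB_eq_trigP]
  rw [PySem.List.foldl_append_singleton_eq_map, List.nil_append, PySem.List.pyRange_one]
  have hlen2 : (((chars.length : Int)) - 0).toNat = chars.length := by omega
  rw [hlen2, List.map_map, ← mapwin_eq_trigP chars "<eos>" "<eos>"]
  apply List.map_congr_left
  intro k hk
  simp only [Function.comp]
  rw [show ((0:Int) + (k : Int)) = ((k : Nat) : Int) by ring]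
  rw [show ((k : Int) + 3) = (((k + 3 : Nat)) : Int) by push_cast; ring,
      PySem.List.slice_natCast (chars ++ ["<eos>", "<eos>"]) k (k + 3)]
  rw [show k + 3 - k = 3 from by omega]
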